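-- pv_equiv track=rewrite | github.com/posl/comment_recommendation | script/mod_gen/3_time/zh/208_A/2.py | throw_dice
-- ===== SOURCE A (Python) =====
-- def throw_dice(num, target):
--     if num == 1:
--         if 1 <= target <= 6:
--             return True
--         else:
--             return False
--     else:
--         for i in range(1, 7):
--             if throw_dice(num-1, target - i):
--                 return True
--         return False
-- ===== SOURCE B (Python) =====
-- def throw_dice(num, target):
--     return num <= target <= 6 * num
-- ===== Notes on version B (the rewrite author's own statement) =====
-- stated objective: faster
-- what changed: Replaced the exponential 6-way recursion with the closed-form interval test num <= target <= 6*num; intended as faster (O(1) vs O(6^num)).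
import Mathlib
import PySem

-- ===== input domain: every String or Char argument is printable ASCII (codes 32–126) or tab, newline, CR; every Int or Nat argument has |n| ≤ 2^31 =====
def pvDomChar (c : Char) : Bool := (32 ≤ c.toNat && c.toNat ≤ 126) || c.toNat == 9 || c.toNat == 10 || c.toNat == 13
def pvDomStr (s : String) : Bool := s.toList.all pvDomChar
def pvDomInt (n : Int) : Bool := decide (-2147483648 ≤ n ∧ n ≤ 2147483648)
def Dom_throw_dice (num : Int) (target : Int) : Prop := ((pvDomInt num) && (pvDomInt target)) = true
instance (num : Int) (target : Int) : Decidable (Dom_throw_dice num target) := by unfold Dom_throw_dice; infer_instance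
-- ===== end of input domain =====

-- B replaces A's recursion by the closed-form interval test num <= target <= 6*num (intended as faster; O(1) closed form).
-- A raises RecursionError for num <= 0; Pre_ excludes exactly those inputs.
-- ===== PORT A =====
-- fuel-based transliteration of A's recursion on num; fuel = num.toNat suffices whenever num >= 1 (Pre_)
def throw_dice_go : Nat → Int → Int → Bool
  | 0, _, _ => false
  | f + 1, num, target =>
    if num == 1 then
      (if 1 ≤ target ∧ target ≤ 6 then true else false)
    else
      (PySem.List.pyRange 1 7 1).any (fun i => throw_dice_go f (num - 1) (target - i))

def throw_dice (num : Int) (target : Int) : Bool :=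
  throw_dice_go num.toNat num target

-- ===== PORT B =====
def throw_dice_alt (num : Int) (target : Int) : Bool :=
  decide (num ≤ target ∧ target ≤ 6 * num)

-- ===== PRECONDITION & SPEC =====
-- A raises RecursionError whenever num <= 0 (the recursion never reaches the base case)
def Pre_throw_dice (num : Int) (_target : Int) : Prop := 1 ≤ num
instance (num : Int) (target : Int) : Decidable (Pre_throw_dice num target) := by unfold Pre_throw_dice; infer_instance
def pvWitness_throw_dice : Int × Int := (3, 10)

def Spec_throw_dice (num : Int) (target : Int) (out : Bool) : Prop := out = throw_dice_alt num target
instance (num : Int) (target : Int) (out : Bool) : Decidable (Spec_throw_dice num target out) := by unfold Spec_throw_dice; infer_instance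

-- ===== CLAIM (what is proved, stated in full; the proofs are below) =====
def Claim_equal_throw_dice : Prop := ∀ (num : Int) (target : Int), Dom_throw_dice num target → Pre_throw_dice num target → Spec_throw_dice num target (throw_dice num target)
-- ===== LEMMAS AND PROOFS =====
lemma throw_dice_go_eq (f : Nat) : ∀ (num target : Int), num.toNat = f → 1 ≤ num →
    throw_dice_go f num target = decide (num ≤ target ∧ target ≤ 6 * num) := by
  induction f with
  | zero => intro num target hf h1; omega
  | succ f ih =>
    intro num target hf h1
    by_cases hnum : num = 1
    · subst hnum
      simp only [throw_dice_go, beq_self_eq_true, if_true]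
      rcases Decidable.em (1 ≤ target ∧ target ≤ 6) with h | h
      · simp [h]
      · simp [h]
    · have h2 : 2 ≤ num := by omega
      have hf' : (num - 1).toNat = f := by omega
      have ih' : ∀ i : Int, throw_dice_go f (num - 1) (target - i)
          = decide (num - 1 ≤ target - i ∧ target - i ≤ 6 * (num - 1)) := fun i =>
        ih (num - 1) (target - i) hf' (by omega)
      have hrange : PySem.List.pyRange 1 7 1 = [1, 2, 3, 4, 5, 6] := by decide
      simp only [throw_dice_go, beq_iff_eq, hnum, if_false, hrange, List.any_cons,
        List.any_nil, ih', Bool.or_false, ← Bool.decide_or, decide_eq_decide]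
      omega

-- ===== VERDICT (by name: the statement is the Claim_ definition above) =====
theorem throw_dice_spec : Claim_equal_throw_dice := by
  intro num target _ hpre
  unfold Spec_throw_dice throw_dice throw_dice_alt
  exact throw_dice_go_eq num.toNat num target rfl hpre
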